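-- pv_equiv track=rewrite | github.com/Tieucuc2210/PythonBasic | DeQuy/ktmtang.py | check
-- ===== SOURCE A (Python) =====
-- def check(a , n):
--     if n == 1:
--         return True
--     else:
--         if a[n-1] <= a[n-2]:
--             return False
--         else:
--             return check(a , n-1)
-- ===== SOURCE B (Python) =====
-- def check(a, n):
--     return all(a[i] > a[i - 1] for i in range(1, n))
-- ===== Notes on version B (the rewrite author's own statement) =====
-- stated objective: simpler
-- what changed: Replaced the recursive back-to-front scan with a single iterative all(...) comprehension over range(1, n), removing the call stack.
-- intended difference: For n <= 0 (with a long enough non-increasing prefix under wraparound) A's negative-index wraparound makes it return False, while B returns the intended vacuous True for checking the first n<=0 elements. — e.g. on check([2, 1], 0): A returns false, B returns true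
import Mathlib
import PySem

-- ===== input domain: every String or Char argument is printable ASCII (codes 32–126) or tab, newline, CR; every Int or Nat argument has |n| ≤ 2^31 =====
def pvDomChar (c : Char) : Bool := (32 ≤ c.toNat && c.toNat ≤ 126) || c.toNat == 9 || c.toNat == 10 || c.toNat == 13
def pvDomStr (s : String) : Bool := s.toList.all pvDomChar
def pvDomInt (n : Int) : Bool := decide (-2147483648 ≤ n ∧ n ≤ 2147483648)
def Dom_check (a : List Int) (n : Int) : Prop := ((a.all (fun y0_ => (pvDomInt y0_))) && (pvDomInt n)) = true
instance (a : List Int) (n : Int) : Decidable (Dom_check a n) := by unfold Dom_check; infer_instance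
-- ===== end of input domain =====

-- B replaces A's back-to-front recursion by a single iterative all(...) scan over range(1, n); for n <= 0 B returns the intended vacuous True where A's negative-index wraparound returns False.


-- ===== PORT A =====
-- Literal transliteration of A's recursion; fuel only makes the recursion total
-- (it is large enough on every input where the Python returns; the fuel-0 /
-- IndexError branches return a junk value outside Pre_check).
def checkFuel (a : List Int) (n : Int) : Nat → Bool
  | 0 => false
  | fuel + 1 =>
    if n = 1 then true
    else
      match PySem.List.pyGet? a (n - 1), PySem.List.pyGet? a (n - 2) with
      | some x, some y => if x ≤ y then false else checkFuel a (n - 1) fuel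
      | _, _ => false   -- IndexError (excluded by Pre_check)

def check (a : List Int) (n : Int) : Bool :=
  checkFuel a n (n.toNat + a.length + 2)

-- ===== PORT B =====
-- all(a[i] > a[i-1] for i in range(1, n))
def check_alt (a : List Int) (n : Int) : Bool :=
  (PySem.List.pyRange 1 n 1).all (fun i =>
    match PySem.List.pyGet? a i, PySem.List.pyGet? a (i - 1) with
    | some x, some y => decide (y < x)
    | _, _ => false)   -- IndexError (excluded by Pre_check)

-- ===== PRECONDITION & SPEC =====
-- Pre_check is exactly the set of inputs on which Python A returns: either
-- 1 ≤ n ≤ len(a), or n ≤ 0 with the wraparound scan hitting a non-increase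
-- (some a[j] ≤ a[j-1] with 1 ≤ j ≤ len(a)+n-1) before it runs off the list;
-- everywhere else A raises IndexError.
def Pre_check (a : List Int) (n : Int) : Prop :=
  (1 ≤ n ∧ n ≤ a.length) ∨
  (n ≤ 0 ∧ 2 ≤ (a.length : Int) + n ∧
    ∃ j ∈ List.range' 1 (((a.length : Int) + n).toNat - 1),
      a.getD j 0 ≤ a.getD (j - 1) 0)
instance (a : List Int) (n : Int) : Decidable (Pre_check a n) := by
  unfold Pre_check; infer_instance

def pvWitness_check : List Int × Int := ([1, 3, 7], 3)

-- For n ≤ 0 (inside Pre_check) A's negative-index wraparound returns False,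
-- while B returns the intended vacuous True for "the first n ≤ 0 elements".
def D_check (a : List Int) (n : Int) : Prop := n ≤ 0
instance (a : List Int) (n : Int) : Decidable (D_check a n) := by
  unfold D_check; infer_instance

def Spec_check (a : List Int) (n : Int) (out : Bool) : Prop :=
  ¬ D_check a n → out = check_alt a n
instance (a : List Int) (n : Int) (out : Bool) : Decidable (Spec_check a n out) := by
  unfold Spec_check; infer_instance

def pvDiffWitness_check : List Int × Int := ([2, 1], 0)
def pvDiffWitnessOut_check : Bool × Bool := (false, true)

-- ===== CLAIM (what is proved, stated in full; the proofs are below) =====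
def Claim_unchanged_check : Prop :=
  ∀ (a : List Int) (n : Int), Dom_check a n → Pre_check a n → Spec_check a n (check a n)
def Claim_changed_check : Prop :=
  Dom_check (pvDiffWitness_check.1) (pvDiffWitness_check.2) ∧
  Pre_check (pvDiffWitness_check.1) (pvDiffWitness_check.2) ∧
  D_check (pvDiffWitness_check.1) (pvDiffWitness_check.2) ∧
  check (pvDiffWitness_check.1) (pvDiffWitness_check.2) = pvDiffWitnessOut_check.1 ∧
  check_alt (pvDiffWitness_check.1) (pvDiffWitness_check.2) = pvDiffWitnessOut_check.2 ∧
  pvDiffWitnessOut_check.1 ≠ pvDiffWitnessOut_check.2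
def Claim_exact_check : Prop :=
  ∀ (a : List Int) (n : Int), Dom_check a n → Pre_check a n → D_check a n →
    check a n ≠ check_alt a n

-- ===== LEMMAS AND PROOFS =====

-- A's port is false everywhere at n ≤ 0 it can reach (wraparound / IndexError junk).
theorem checkFuel_nonpos (a : List Int) (n : Int) (fuel : Nat) (hn : n ≤ 0) :
    checkFuel a n fuel = false := by
  induction fuel generalizing n with
  | zero => rfl
  | succ f ih =>
    simp only [checkFuel]
    rw [if_neg (by omega)]
    cases PySem.List.pyGet? a (n - 1) with
    | none => rfl
    | some x =>
      cases PySem.List.pyGet? a (n - 2) with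
      | none => rfl
      | some y =>
        by_cases h : x ≤ y
        · simp [h]
        · simp [h, ih (n - 1) (by omega)]

-- B's port is true at n ≤ 0 (empty range).
theorem check_alt_nonpos (a : List Int) (n : Int) (hn : n ≤ 0) :
    check_alt a n = true := by
  unfold check_alt
  rw [PySem.List.pyRange_one_eq_nil (by omega)]
  rfl

-- Main invariant: on 1 ≤ k ≤ len(a), with enough fuel, A's recursion computes
-- B's scan of range(1, k).
theorem checkFuel_eq_alt (a : List Int) (k fuel : Nat) (h1 : 1 ≤ k)
    (h2 : k ≤ a.length) (hf : k ≤ fuel) :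
    checkFuel a (k : Int) fuel = check_alt a (k : Int) := by
  induction k generalizing fuel with
  | zero => omega
  | succ m ih =>
    obtain ⟨f, rfl⟩ : ∃ f, fuel = f + 1 := ⟨fuel - 1, by omega⟩
    by_cases hm : m = 0
    · subst hm
      simp only [checkFuel]
      rw [if_pos (by norm_num)]
      unfold check_alt
      rw [PySem.List.pyRange_one_eq_nil (by norm_num)]
      rfl
    · have hmlt : m < a.length := by omega
      have hm1 : m - 1 < a.length := by omega
      have e1 : PySem.List.pyGet? a ((m + 1 : Nat) - 1 : Int) = some a[m] := by
        have : ((m + 1 : Nat) - 1 : Int) = (m : Int) := by push_cast; ring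
        rw [this, PySem.List.pyGet?_natCast]
        simp [hmlt]
      have e2 : PySem.List.pyGet? a ((m + 1 : Nat) - 2 : Int) = some a[m - 1] := by
        have : ((m + 1 : Nat) - 2 : Int) = ((m - 1 : Nat) : Int) := by
          push_cast [hm]; omega
        rw [this, PySem.List.pyGet?_natCast]
        simp [hm1]
      -- unfold B on k = m+1 : range(1, m+1) = range(1, m) ++ [m]
      have hsplit : PySem.List.pyRange 1 ((m + 1 : Nat) : Int) 1
          = PySem.List.pyRange 1 (m : Int) 1 ++ [(m : Int)] := by
        have : ((m + 1 : Nat) : Int) = (m : Int) + 1 := by push_cast; ring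
        rw [this, PySem.List.pyRange_one_succ_right (by omega)]
      simp only [checkFuel]
      rw [if_neg (by omega)]
      rw [e1, e2]
      unfold check_alt
      rw [hsplit, List.all_append]
      have elast :
          (fun i => match PySem.List.pyGet? a i, PySem.List.pyGet? a (i - 1) with
            | some x, some y => decide (y < x)
            | _, _ => false) (m : Int) = decide (a[m - 1] < a[m]) := by
        have g1 : PySem.List.pyGet? a (m : Int) = some a[m] := by
          rw [PySem.List.pyGet?_natCast]; simp [hmlt]
        have g2 : PySem.List.pyGet? a ((m : Int) - 1) = some a[m - 1] := by
          have : ((m : Int) - 1) = ((m - 1 : Nat) : Int) := by push_cast [hm]; omega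
          rw [this, PySem.List.pyGet?_natCast]; simp [hm1]
        simp only [g1, g2]
      simp only [List.all_cons, List.all_nil, elast]
      by_cases hle : a[m] ≤ a[m - 1]
      · rw [if_pos hle]
        have : decide (a[m - 1] < a[m]) = false := by simp; omega
        simp [this]
      · rw [if_neg hle]
        have hrec : checkFuel a ((m + 1 : Nat) - 2 + 1 : Int) f = check_alt a (m : Int) := by
          have : ((m + 1 : Nat) - 2 + 1 : Int) = ((m : Nat) : Int) := by push_cast; ring
          rw [this]
          exact ih f (by omega) (by omega) (by omega)
        have harg : ((m + 1 : Nat) : Int) - 1 = ((m + 1 : Nat) - 2 + 1 : Int) := by ring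
        rw [harg, hrec]
        unfold check_alt
        have : decide (a[m - 1] < a[m]) = true := by simp; omega
        simp [this]

-- ===== VERDICT (by name: the statement is the Claim_ definition above) =====
theorem check_spec : Claim_unchanged_check := by
  intro a n _ hpre hnd
  unfold D_check at hnd
  have hn : 1 ≤ n ∧ n ≤ a.length := by
    rcases hpre with h | h
    · exact h
    · omega
  obtain ⟨k, rfl⟩ : ∃ k : Nat, n = (k : Int) := ⟨n.toNat, by omega⟩
  unfold check
  exact checkFuel_eq_alt a k _ (by omega) (by omega) (by omega)

theorem check_changed : Claim_changed_check := by
  unfold Claim_changed_check; decide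

theorem check_tight : Claim_exact_check := by
  intro a n _ _ hd
  unfold D_check at hd
  rw [check_alt_nonpos a n hd]
  unfold check
  rw [checkFuel_nonpos a n _ hd]
  simp
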